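-- pv_equiv track=rewrite | github.com/neryos/crcr-heb-proj | scripts/decoder/candidates-suggester.py | isCandidateBasedOnDefintion
-- ===== SOURCE A (Python) =====
-- def isCandidateBasedOnDefintion(candidate_words, anagram_part_words, logger):
--     # create a copy of the anagram words
--     anagram_words_copy = anagram_part_words[:]
--
--     title_words_list = candidate_words
--     if len(title_words_list) == len(anagram_part_words):
--         for title_word in title_words_list:
--             if title_word in anagram_words_copy:
--                 anagram_words_copy.remove(title_word)
--         if len(anagram_words_copy) == 0:
--             # a shuffle was detected, candidate should be filter
--             return True
--     return False
-- ===== SOURCE B (Python) =====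
-- def isCandidateBasedOnDefintion(candidate_words, anagram_part_words, logger):
--     return sorted(candidate_words) == sorted(anagram_part_words)
-- ===== Notes on version B (the rewrite author's own statement) =====
-- stated objective: faster
-- what changed: Replaces the copy-and-remove loop (scan the copy for each word, remove matches, test emptiness) with a one-line sort-and-compare: sorted(candidate_words) == sorted(anagram_part_words); the length guard disappears since lists of unequal length never sort-equal.
import Mathlib
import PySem

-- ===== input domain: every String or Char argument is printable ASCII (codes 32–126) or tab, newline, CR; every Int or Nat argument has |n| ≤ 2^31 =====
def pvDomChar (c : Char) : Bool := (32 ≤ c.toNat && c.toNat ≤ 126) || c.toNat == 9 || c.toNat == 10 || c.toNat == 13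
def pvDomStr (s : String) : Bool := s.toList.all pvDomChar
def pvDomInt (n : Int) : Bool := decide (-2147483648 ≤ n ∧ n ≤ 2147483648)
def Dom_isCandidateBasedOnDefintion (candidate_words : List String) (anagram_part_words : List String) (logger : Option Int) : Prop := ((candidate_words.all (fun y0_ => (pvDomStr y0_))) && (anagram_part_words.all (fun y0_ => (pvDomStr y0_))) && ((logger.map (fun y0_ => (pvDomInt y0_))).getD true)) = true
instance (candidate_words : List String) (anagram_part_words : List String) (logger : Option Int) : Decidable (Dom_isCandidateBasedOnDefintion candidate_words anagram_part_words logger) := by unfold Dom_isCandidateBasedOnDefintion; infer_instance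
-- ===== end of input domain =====

-- B replaces A's copy-and-remove loop with a single sort-and-compare (simpler, no mutation).


-- ===== PORT A =====
-- literal transliteration of A: copy the anagram list, remove each title word found, test emptiness
def isCandidateBasedOnDefintion (candidate_words : List String) (anagram_part_words : List String) (logger : Option Int) : Bool :=
  let anagram_words_copy := anagram_part_words   -- anagram_part_words[:]
  let title_words_list := candidate_words
  if title_words_list.length == anagram_part_words.length then
    -- for title_word in title_words_list: if title_word in copy: copy.remove(title_word)
    let final_copy := title_words_list.foldl
      (fun acc title_word => if title_word ∈ acc then acc.erase title_word else acc)
      anagram_words_copy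
    if final_copy.length == 0 then true else false
  else false

-- ===== PORT B =====
-- literal transliteration of B: sorted(candidate_words) == sorted(anagram_part_words)
def isCandidateBasedOnDefintion_alt (candidate_words : List String) (anagram_part_words : List String) (logger : Option Int) : Bool :=
  PySem.List.sorted candidate_words (fun x => x) false == PySem.List.sorted anagram_part_words (fun x => x) false

-- ===== PRECONDITION & SPEC =====
def Spec_isCandidateBasedOnDefintion (candidate_words : List String) (anagram_part_words : List String) (logger : Option Int) (out : Bool) : Prop := out = isCandidateBasedOnDefintion_alt candidate_words anagram_part_words logger
instance (candidate_words : List String) (anagram_part_words : List String) (logger : Option Int) (out : Bool) : Decidable (Spec_isCandidateBasedOnDefintion candidate_words anagram_part_words logger out) := by unfold Spec_isCandidateBasedOnDefintion; infer_instance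

-- ===== CLAIM (what is proved, stated in full; the proofs are below) =====
def Claim_equal_isCandidateBasedOnDefintion : Prop := ∀ (candidate_words : List String) (anagram_part_words : List String) (logger : Option Int), Dom_isCandidateBasedOnDefintion candidate_words anagram_part_words logger → Spec_isCandidateBasedOnDefintion candidate_words anagram_part_words logger (isCandidateBasedOnDefintion candidate_words anagram_part_words logger)

-- ===== LEMMAS AND PROOFS =====

-- one removal step of A's loop
def pvEraseStep (acc : List String) (w : String) : List String :=
  if w ∈ acc then acc.erase w else acc

theorem pvFold_len_ge (c : List String) : ∀ a : List String,
    a.length ≤ (c.foldl pvEraseStep a).length + c.length := by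
  induction c with
  | nil => intro a; simp
  | cons w c ih =>
    intro a
    have h := ih (pvEraseStep a w)
    have hstep : a.length ≤ (pvEraseStep a w).length + 1 := by
      unfold pvEraseStep
      split_ifs with hm
      · have := List.length_erase_of_mem hm; omega
      · omega
    simp only [List.foldl_cons, List.length_cons]
    omega

theorem pvFold_empty_iff (c : List String) : ∀ a : List String,
    (c.foldl pvEraseStep a = [] ∧ c.length = a.length) ↔ c.Perm a := by
  induction c with
  | nil =>
    intro a
    constructor
    · rintro ⟨_, hlen⟩
      have : a = [] := by
        cases a with
        | nil => rfl
        | cons x xs => simp at hlen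
      simp [this]
    · intro hp
      have := hp.length_eq
      simp_all
  | cons w c ih =>
    intro a
    constructor
    · rintro ⟨hfold, hlen⟩
      simp only [List.foldl_cons] at hfold
      by_cases hm : w ∈ a
      · have hstep : pvEraseStep a w = a.erase w := by simp [pvEraseStep, hm]
        rw [hstep] at hfold
        have hlen' : c.length = (a.erase w).length := by
          have := List.length_erase_of_mem hm
          simp at hlen; omega
        have hperm : c.Perm (a.erase w) := (ih (a.erase w)).1 ⟨hfold, hlen'⟩
        exact (hperm.cons w).trans (List.perm_cons_erase hm).symm
      · exfalso
        have hstep : pvEraseStep a w = a := by simp [pvEraseStep, hm]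
        rw [hstep] at hfold
        have hge := pvFold_len_ge c a
        rw [hfold] at hge
        simp at hge hlen
        omega
    · intro hp
      have hm : w ∈ a := hp.mem_iff.mp (by simp)
      have hperm : c.Perm (a.erase w) :=
        (hp.trans (List.perm_cons_erase hm)).cons_inv
      have hlen' : c.length = (a.erase w).length := hperm.length_eq
      have hfold := (ih (a.erase w)).2 hperm
      refine ⟨?_, by have := hp.length_eq; simpa using this⟩
      simp only [List.foldl_cons]
      have hstep : pvEraseStep a w = a.erase w := by simp [pvEraseStep, hm]
      rw [hstep]
      exact hfold.1

-- ===== VERDICT (by name: the statement is the Claim_ definition above) =====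
theorem isCandidateBasedOnDefintion_spec : Claim_equal_isCandidateBasedOnDefintion := by
  intro c a l _
  unfold Spec_isCandidateBasedOnDefintion isCandidateBasedOnDefintion isCandidateBasedOnDefintion_alt
  apply Bool.eq_iff_iff.mpr
  rw [beq_iff_eq, PySem.List.sorted_id_eq_sorted_id_iff_perm]
  show (if (c.length == a.length) = true then
          if ((c.foldl pvEraseStep a).length == 0) = true then true else false
        else false) = true ↔ c.Perm a
  constructor
  · intro h
    split_ifs at h with hlen hempty
    · simp only [beq_iff_eq] at hlen
      simp only [beq_iff_eq, List.length_eq_zero_iff] at hempty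
      exact (pvFold_empty_iff c a).mp ⟨hempty, hlen⟩
  · intro hp
    have ⟨hfold, hlen⟩ := (pvFold_empty_iff c a).mpr hp
    simp [hlen, hfold]
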